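-- pv_equiv track=rewrite | github.com/TOMATOsJr/Text2Table | Post mid sub files _ rough/kg_to_table.py | deduplicate_values
-- ===== SOURCE A (Python) =====
-- def deduplicate_values(values: list[str]) -> list[str]:
--     """Remove duplicates and redundant substrings within an attribute's values.
--
--     Two strategies applied sequentially:
--
--     1. **Case-insensitive exact dedup** — "Baseball" and "baseball" are treated
--        as the same; the first occurrence's casing is kept.
--
--     2. **Substring absorption** — If "baseball" and "major league baseball"
--        both appear, the shorter one is absorbed by the longer one.  This fixes
--        the duplication bug observed in processed_triples_44k_resolved.json
--        where objects were erroneously concatenated.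
--
--     Example
--     -------
--     ["baseball", "major league baseball", "Baseball"]
--       → ["major league baseball"]
--     """
--     if not values:
--         return values
--
--     # Step 1: Case-insensitive exact dedup (preserve first casing).
--     seen_lower: set[str] = set()
--     unique: list[str] = []
--     for v in values:
--         v = v.strip()
--         if not v:
--             continue
--         v_lower = v.lower()
--         if v_lower not in seen_lower:
--             seen_lower.add(v_lower)
--             unique.append(v)
--
--     if len(unique) <= 1:
--         return unique
--
--     # Step 2: Substring absorption — sort longest first, drop shorter values
--     # that are fully contained in a longer already-accepted value.
--     sorted_by_len = sorted(unique, key=len, reverse=True)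
--     kept: list[str] = []
--
--     for val in sorted_by_len:
--         val_lower = val.lower()
--         is_absorbed = any(
--             val_lower in accepted.lower() and val_lower != accepted.lower()
--             for accepted in kept
--         )
--         if not is_absorbed:
--             kept.append(val)
--
--     return kept
-- ===== SOURCE B (Python) =====
-- def deduplicate_values(values: list[str]) -> list[str]:
--     """Case-insensitive dedup, then an independent substring filter.
--
--     Step 2 is a single filter over the sorted unique list: keep a value
--     unless its lowercase form is a proper substring of some other unique
--     value's lowercase form (equivalent to A's growing-accumulator scan by
--     transitivity of substring containment).  Lowercase forms are computed
--     once up front, and each value is tested only against the prefix of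
--     strictly longer values (cut indices per length), instead of A's rescan
--     of the growing kept list with a .lower() call per comparison."""
--     seen = set()
--     unique = []
--     for v in values:
--         v = v.strip()
--         if v and v.lower() not in seen:
--             seen.add(v.lower())
--             unique.append(v)
--     s = sorted(unique, key=len, reverse=True)
--     lows = [u.lower() for u in s]
--     cuts = {}
--     for i, ul in enumerate(lows):
--         if len(ul) not in cuts:
--             cuts[len(ul)] = i
--     # cuts[len(vl)] always hits: vl itself is in lows
--     return [v for v, vl in zip(s, lows)
--             if not any(vl in ul for ul in lows[:cuts[len(vl)]])]
-- ===== Notes on version B (the rewrite author's own statement) =====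
-- stated objective: alternative
-- what changed: Step 2's absorption is computed as an independent filter over the sorted unique list (keep a value unless its lowercase form is a proper substring of some strictly longer unique value's), with lowercase forms precomputed once and per-length cut indices restricting each scan to the strictly longer prefix, instead of A's incremental scan against the growing accepted list that re-lowercases every accepted value per comparison; equivalence follows from transitivity of substring containment.
import Mathlib
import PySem

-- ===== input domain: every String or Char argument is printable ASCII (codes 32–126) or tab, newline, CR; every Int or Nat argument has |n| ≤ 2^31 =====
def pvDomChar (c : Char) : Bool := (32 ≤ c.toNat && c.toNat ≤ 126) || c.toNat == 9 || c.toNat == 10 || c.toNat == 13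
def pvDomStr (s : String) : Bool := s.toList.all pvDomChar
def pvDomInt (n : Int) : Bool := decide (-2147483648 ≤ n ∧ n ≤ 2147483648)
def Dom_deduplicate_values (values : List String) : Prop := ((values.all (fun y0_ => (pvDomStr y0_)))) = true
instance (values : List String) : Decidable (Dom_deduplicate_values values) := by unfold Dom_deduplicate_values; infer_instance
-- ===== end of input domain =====

-- B replaces A's step-2 accumulator scan (absorb against the values kept so far, re-lowercasing
-- each accepted value per comparison) by an independent filter over the sorted unique list, with
-- lowercase forms precomputed once and each value tested only against the prefix of strictly
-- longer values (a cut index per length); equivalent by transitivity of substring containment.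

-- ===== PORT A =====
def deduplicate_values (values : List String) : List String :=
  if values = [] then values
  else
    -- Step 1: case-insensitive exact dedup (preserve first casing).
    let st := values.foldl (fun (st : PySem.Set String × List String) v =>
        let v := PySem.Str.strip v
        if PySem.Str.len v = 0 then st
        else
          let vLower := PySem.Str.lower v
          if PySem.Set.contains st.1 vLower then st
          else (PySem.Set.add st.1 vLower, st.2 ++ [v])) (PySem.Set.empty, [])
    let unique := st.2
    if unique.length ≤ 1 then unique
    else
      -- Step 2: sort longest first, drop values absorbed by an already-accepted one.
      let sortedByLen := PySem.List.sorted unique (fun x => PySem.Str.len x) true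
      sortedByLen.foldl (fun kept val =>
        let valLower := PySem.Str.lower val
        let isAbsorbed := kept.any (fun accepted =>
          PySem.Str.isIn valLower (PySem.Str.lower accepted) &&
            valLower != PySem.Str.lower accepted)
        if !isAbsorbed then kept ++ [val] else kept) []

-- ===== PORT B =====
def deduplicate_values_alt (values : List String) : List String :=
  let st := values.foldl (fun (st : PySem.Set String × List String) v =>
      let v := PySem.Str.strip v
      if PySem.Str.len v ≠ 0 ∧ ¬ PySem.Set.contains st.1 (PySem.Str.lower v) = true then
        (PySem.Set.add st.1 (PySem.Str.lower v), st.2 ++ [v])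
      else st) (PySem.Set.empty, [])
  let s := PySem.List.sorted st.2 (fun x => PySem.Str.len x) true
  let lows := s.map (fun u => PySem.Str.lower u)
  let cuts := (PySem.List.enumerate lows 0).foldl
      (fun (cuts : PySem.Dict Int Int) p =>
        if ¬ PySem.Dict.contains cuts (PySem.Str.len p.2) = true then
          PySem.Dict.insert cuts (PySem.Str.len p.2) p.1
        else cuts) PySem.Dict.empty
  -- cuts[len(vl)] in the Python never raises (vl itself is in lows), so getD is exact here
  ((s.zip lows).filter (fun p =>
      !((PySem.List.slice lows none (some (PySem.Dict.getD cuts (PySem.Str.len p.2) 0))).any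
          (fun ul => PySem.Str.isIn p.2 ul)))).map (fun p => p.1)

-- ===== PRECONDITION & SPEC =====
def Spec_deduplicate_values (values : List String) (out : List String) : Prop := out = deduplicate_values_alt values
instance (values : List String) (out : List String) : Decidable (Spec_deduplicate_values values out) := by unfold Spec_deduplicate_values; infer_instance

-- ===== CLAIM (what is proved, stated in full; the proofs are below) =====
def Claim_equal_deduplicate_values : Prop := ∀ (values : List String), Dom_deduplicate_values values → Spec_deduplicate_values values (deduplicate_values values)

-- ===== LEMMAS AND PROOFS =====

-- 'v is absorbed by u': v's lowercase form is a proper substring of u's.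
def pvAbs (v u : String) : Bool :=
  PySem.Str.isIn (PySem.Str.lower v) (PySem.Str.lower u) &&
    PySem.Str.lower v != PySem.Str.lower u

theorem length_toList_lower (v : String) :
    (PySem.Str.lower v).toList.length = v.toList.length := by
  simp [PySem.Chars.lower]

theorem pvAbs_len {v u : String} (h : pvAbs v u = true) :
    v.toList.length < u.toList.length := by
  simp only [pvAbs, Bool.and_eq_true, bne_iff_ne, ne_eq] at h
  obtain ⟨h1, h2⟩ := h
  rw [PySem.Str.isIn_iff_infix] at h1
  have hle := h1.length_le
  rw [length_toList_lower, length_toList_lower] at hle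
  rcases lt_or_eq_of_le hle with h | h
  · exact h
  · exfalso
    apply h2
    apply String.toList_inj.mp
    exact h1.eq_of_length (by rw [length_toList_lower, length_toList_lower]; exact h)

theorem pvAbs_trans {v u w : String} (h1 : pvAbs v u = true) (h2 : pvAbs u w = true) :
    pvAbs v w = true := by
  have hlen : v.toList.length < w.toList.length := lt_trans (pvAbs_len h1) (pvAbs_len h2)
  simp only [pvAbs, Bool.and_eq_true, bne_iff_ne, ne_eq] at h1 h2 ⊢
  rw [PySem.Str.isIn_iff_infix] at h1 h2 ⊢
  refine ⟨h1.1.trans h2.1, fun he => ?_⟩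
  have := congrArg (fun s => s.toList.length) he
  simp only [length_toList_lower] at this
  omega

-- A's step-2 fold over a length-nonincreasing list equals B's independent filter.
theorem foldl_absorb_aux (s : List String)
    (hs : s.Pairwise (fun a b => b.toList.length ≤ a.toList.length)) :
    ∀ (q p : List String), s = p ++ q →
      q.foldl (fun kept val =>
          if !(kept.any (fun a => pvAbs val a)) then kept ++ [val] else kept)
        (p.filter (fun v => !(s.any (fun u => pvAbs v u))))
        = s.filter (fun v => !(s.any (fun u => pvAbs v u))) := by
  intro q
  induction q with
  | nil => intro p hp; simp [hp]
  | cons v q' ih =>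
    intro p hp
    have hkey : (p.filter (fun x => !(s.any (fun u => pvAbs x u)))).any (fun a => pvAbs v a)
        = s.any (fun u => pvAbs v u) := by
      cases habs : s.any (fun u => pvAbs v u) with
      | false =>
        rw [List.any_eq_false] at habs ⊢
        intro a ha
        exact habs a (by rw [hp]; exact List.mem_append_left _ (List.mem_of_mem_filter ha))
      | true =>
        rw [List.any_eq_true] at habs
        set F := s.filter (fun u => pvAbs v u) with hF
        have hFne : F ≠ [] := by
          obtain ⟨u, hu, hvu⟩ := habs
          intro h0
          have : u ∈ F := List.mem_filter.mpr ⟨hu, hvu⟩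
          simp [h0] at this
        obtain ⟨m, hm⟩ : ∃ m, m ∈ List.argmax (fun x : String => x.toList.length) F := by
          cases h : List.argmax (fun x : String => x.toList.length) F with
          | none => exact absurd (List.argmax_eq_none.mp h) hFne
          | some m => exact ⟨m, by rw [Option.mem_def]⟩
        have hmF : m ∈ F := List.argmax_mem hm
        have hms : m ∈ s := List.mem_of_mem_filter hmF
        have hvm : pvAbs v m = true := (List.mem_filter.mp hmF).2
        have hPbm : (s.any (fun u => pvAbs m u)) = false := by
          rw [List.any_eq_false]
          intro w hw
          by_contra hmw
          have hvw : pvAbs v w = true := pvAbs_trans hvm hmw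
          have hwF : w ∈ F := List.mem_filter.mpr ⟨hw, hvw⟩
          have := List.le_of_mem_argmax hwF hm
          have := pvAbs_len hmw
          omega
        have hmp : m ∈ p := by
          rw [hp] at hms
          rcases List.mem_append.mp hms with h | h
          · exact h
          · exfalso
            rcases List.mem_cons.mp h with h | h
            · subst h; have := pvAbs_len hvm; omega
            · rw [hp] at hs
              have h2 := (List.pairwise_append.mp hs).2.1
              have := (List.pairwise_cons.mp h2).1 m h
              have := pvAbs_len hvm
              omega
        rw [List.any_eq_true]
        exact ⟨m, List.mem_filter.mpr ⟨hmp, by simp [hPbm]⟩, hvm⟩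
    simp only [List.foldl_cons, hkey]
    cases habs : s.any (fun u => pvAbs v u) with
    | true =>
      simp only [Bool.not_true, Bool.false_eq_true, if_false]
      have := ih (p ++ [v]) (by simpa using hp)
      rw [List.filter_append, List.filter_singleton] at this
      simp only [habs, Bool.not_true, cond_false, List.append_nil] at this
      exact this
    | false =>
      simp only [Bool.not_false, if_true]
      have := ih (p ++ [v]) (by simpa using hp)
      rw [List.filter_append, List.filter_singleton] at this
      simp only [habs, Bool.not_false, cond_true] at this
      exact this

theorem foldl_absorb_eq_filter (s : List String)
    (hs : s.Pairwise (fun a b => b.toList.length ≤ a.toList.length)) :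
    s.foldl (fun kept val =>
        if !(kept.any (fun a => pvAbs val a)) then kept ++ [val] else kept) []
      = s.filter (fun v => !(s.any (fun u => pvAbs v u))) := by
  simpa using foldl_absorb_aux s hs s [] rfl

-- B's cut-index dictionary: first index at which each length occurs.
def pvCutsStep (cuts : PySem.Dict Int Int) (p : Int × String) : PySem.Dict Int Int :=
  if ¬ PySem.Dict.contains cuts (PySem.Str.len p.2) = true then
    PySem.Dict.insert cuts (PySem.Str.len p.2) p.1
  else cuts

theorem cuts_get?_of_contains (ws : List String) (L : Int) :
    ∀ (k : Int) (d : PySem.Dict Int Int), d.contains L = true →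
      ((PySem.List.enumerate ws k).foldl pvCutsStep d).get? L = d.get? L := by
  induction ws with
  | nil => intro k d _; rfl
  | cons w ws ih =>
    intro k d hd
    have hcons : PySem.List.enumerate (w :: ws) k = (k, w) :: PySem.List.enumerate ws (k+1) := by
      simp [PySem.List.enumerate]
    rw [hcons, List.foldl_cons]
    by_cases hw : PySem.Str.len w = L
    · have hstep : pvCutsStep d (k, w) = d := by
        simp only [pvCutsStep]; rw [hw, if_neg (not_not_intro hd)]
      rw [hstep]; exact ih (k+1) d hd
    · by_cases hc : d.contains (PySem.Str.len w) = true
      · have hstep : pvCutsStep d (k, w) = d := by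
          simp only [pvCutsStep]; rw [if_neg (not_not_intro hc)]
        rw [hstep]; exact ih (k+1) d hd
      · have hstep : pvCutsStep d (k, w) = d.insert (PySem.Str.len w) k := by
          simp only [pvCutsStep]; rw [if_pos hc]
        rw [hstep, ih (k+1) _ (by
          rw [PySem.Dict.contains_insert, hd, Bool.or_true]),
          PySem.Dict.get?_insert_of_ne _ _ (Ne.symm hw)]

theorem cuts_getD_first (ws : List String) (L : Int) :
    ∀ (k : Int) (d : PySem.Dict Int Int), d.contains L = false →
      (∃ w ∈ ws, PySem.Str.len w = L) →
      PySem.Dict.getD ((PySem.List.enumerate ws k).foldl pvCutsStep d) L 0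
        = k + ((ws.takeWhile (fun w => PySem.Str.len w != L)).length : Int) := by
  induction ws with
  | nil => intro k d _ hex; simp at hex
  | cons w ws ih =>
    intro k d hd hex
    have hcons : PySem.List.enumerate (w :: ws) k = (k, w) :: PySem.List.enumerate ws (k+1) := by
      simp [PySem.List.enumerate]
    rw [hcons, List.foldl_cons]
    by_cases hw : PySem.Str.len w = L
    · have hstep : pvCutsStep d (k, w) = d.insert L k := by
        simp only [pvCutsStep]; rw [hw, if_pos (by simp [hd])]
      rw [hstep]
      have hget := cuts_get?_of_contains ws L (k+1) (d.insert L k) (by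
        rw [PySem.Dict.contains_insert]; simp)
      rw [PySem.Dict.getD_of_get?_eq_some _ _ (by
        rw [hget]; exact PySem.Dict.get?_insert_self d L k)]
      rw [List.takeWhile_cons, show (PySem.Str.len w != L) = false by
        rw [hw]; exact bne_self_eq_false L]
      simp
    · have hex' : ∃ x ∈ ws, PySem.Str.len x = L := by
        rcases hex with ⟨x, hx, hxL⟩
        rcases List.mem_cons.mp hx with h | h
        · exact absurd (h ▸ hxL) hw
        · exact ⟨x, h, hxL⟩
      have htail : ∀ d' : PySem.Dict Int Int, d'.contains L = false →
          PySem.Dict.getD ((PySem.List.enumerate ws (k+1)).foldl pvCutsStep d') L 0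
            = (k+1) + ((ws.takeWhile (fun w => PySem.Str.len w != L)).length : Int) :=
        fun d' hd' => ih (k+1) d' hd' hex'
      have hTW : (w :: ws).takeWhile (fun w => PySem.Str.len w != L)
          = w :: ws.takeWhile (fun w => PySem.Str.len w != L) := by
        rw [List.takeWhile_cons, if_pos (bne_iff_ne.mpr hw)]
      rw [hTW]
      by_cases hc : d.contains (PySem.Str.len w) = true
      · have hstep : pvCutsStep d (k, w) = d := by
          simp only [pvCutsStep]; rw [if_neg (not_not_intro hc)]
        rw [hstep, htail d hd]
        rw [List.length_cons]; push_cast; ring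
      · have hstep : pvCutsStep d (k, w) = d.insert (PySem.Str.len w) k := by
          simp only [pvCutsStep]; rw [if_pos hc]
        rw [hstep, htail _ (by
          simp only [PySem.Dict.contains_insert, Bool.or_eq_false_iff]
          exact ⟨beq_eq_false_iff_ne.mpr (fun h => hw h.symm), hd⟩)]
        rw [List.length_cons]; push_cast; ring

-- in a length-nonincreasing list, every strictly-longer element lies in the prefix
-- of elements whose length differs from L
theorem mem_takeWhile_of_longer (ws : List String) (L : Int) :
    ws.Pairwise (fun a b => PySem.Str.len b ≤ PySem.Str.len a) →
    ∀ x ∈ ws, L < PySem.Str.len x →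
      x ∈ ws.takeWhile (fun w => PySem.Str.len w != L) := by
  induction ws with
  | nil => intro _ x hx; simp at hx
  | cons w ws ih =>
    intro hpw x hx hlen
    obtain ⟨hw1, hw2⟩ := List.pairwise_cons.mp hpw
    by_cases hwL : PySem.Str.len w = L
    · exfalso
      rcases List.mem_cons.mp hx with h | h
      · subst h; omega
      · have := hw1 x h; omega
    · rw [List.takeWhile_cons, if_pos (by simpa using hwL)]
      rcases List.mem_cons.mp hx with h | h
      · exact h ▸ List.mem_cons_self
      · exact List.mem_cons_of_mem _ (ih hw2 x h hlen)

theorem len_lower_int (u : String) :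
    PySem.Str.len (PySem.Str.lower u) = (u.toList.length : Int) := by
  rw [PySem.Str.len_eq, length_toList_lower]

-- the heart of B: the any-scan over the strictly-longer prefix equals the
-- absorption test against the whole list
theorem bigAny_eq (s : List String)
    (hpw : s.Pairwise (fun a b => b.toList.length ≤ a.toList.length))
    (v : String) (hv : v ∈ s) :
    (PySem.List.slice (s.map (fun u => PySem.Str.lower u)) none
        (some (PySem.Dict.getD
          ((PySem.List.enumerate (s.map (fun u => PySem.Str.lower u)) 0).foldl pvCutsStep
            PySem.Dict.empty)
          (PySem.Str.len (PySem.Str.lower v)) 0))).any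
        (fun ul => PySem.Str.isIn (PySem.Str.lower v) ul)
      = s.any (fun u => pvAbs v u) := by
  set lows := s.map (fun u => PySem.Str.lower u) with hlows
  set L := PySem.Str.len (PySem.Str.lower v) with hLdef
  have hpl : lows.Pairwise (fun a b => PySem.Str.len b ≤ PySem.Str.len a) := by
    refine List.Pairwise.map _ (fun a b h => ?_) hpw
    rw [len_lower_int, len_lower_int]
    exact_mod_cast h
  have hex : ∃ w ∈ lows, PySem.Str.len w = L :=
    ⟨PySem.Str.lower v, List.mem_map_of_mem hv, rfl⟩
  set tw := lows.takeWhile (fun w => PySem.Str.len w != L) with htw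
  have hc := cuts_getD_first lows L 0 PySem.Dict.empty rfl hex
  rw [zero_add] at hc
  rw [hc]
  have hslice : PySem.List.slice lows none (some ((tw.length : Nat) : Int)) = lows.take tw.length := by
    simp [pysem]
  rw [hslice, ← List.prefix_iff_eq_take.mp (List.takeWhile_prefix _)]
  -- now: tw.any (isIn (lower v)) = s.any (pvAbs v)
  cases hA : s.any (fun u => pvAbs v u) with
  | true =>
    rw [List.any_eq_true] at hA ⊢
    obtain ⟨u, hu, hvu⟩ := hA
    refine ⟨PySem.Str.lower u, ?_, ?_⟩
    · refine mem_takeWhile_of_longer lows L hpl _ (List.mem_map_of_mem hu) ?_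
      have := pvAbs_len hvu
      rw [len_lower_int, hLdef, len_lower_int]
      exact_mod_cast this
    · simp only [pvAbs, Bool.and_eq_true] at hvu
      exact hvu.1
  | false =>
    rw [List.any_eq_false] at hA ⊢
    intro ul hul
    have hpred := List.mem_takeWhile_imp hul
    have hmem : ul ∈ lows := (List.takeWhile_prefix _).subset hul
    obtain ⟨u, hu, rfl⟩ := List.mem_map.mp hmem
    have hne : PySem.Str.lower v ≠ PySem.Str.lower u := by
      intro he
      rw [bne_iff_ne, ne_eq] at hpred
      exact hpred (by rw [← he])
    intro hin
    exact hA u hu (by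
      simp only [pvAbs]; rw [hin, Bool.true_and]; exact bne_iff_ne.mpr hne)

-- list-comprehension over zip(s, map f s) with a condition on the second component
theorem zip_map_filter_map (s : List String) (f : String → String) (q : String → Bool) :
    ((s.zip (s.map f)).filter (fun p => q p.2)).map (fun p => p.1)
      = s.filter (fun v => q (f v)) := by
  induction s with
  | nil => rfl
  | cons v s ih =>
    simp only [List.map_cons, List.zip_cons_cons, List.filter_cons]
    cases q (f v) <;> simp [ih]

-- The two step-1 loop bodies compute the same state transition.
theorem step1_fun_eq :
    (fun (st : PySem.Set String × List String) v =>
        let v := PySem.Str.strip v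
        if PySem.Str.len v = 0 then st
        else
          let vLower := PySem.Str.lower v
          if PySem.Set.contains st.1 vLower then st
          else (PySem.Set.add st.1 vLower, st.2 ++ [v]))
      = (fun (st : PySem.Set String × List String) v =>
        let v := PySem.Str.strip v
        if PySem.Str.len v ≠ 0 ∧ ¬ PySem.Set.contains st.1 (PySem.Str.lower v) = true then
          (PySem.Set.add st.1 (PySem.Str.lower v), st.2 ++ [v])
        else st) := by
  funext st v
  by_cases h0 : PySem.Chars.strip v.toList = []
  · simp [h0]
  · by_cases h1 : PySem.Str.lower (PySem.Str.strip v) ∈ st.1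
    · simp [h0, h1]
    · simp [h0, h1]

-- B's whole step 2 equals the absorption filter.
theorem alt_step2_eq (s : List String)
    (hpw : s.Pairwise (fun a b => b.toList.length ≤ a.toList.length)) :
    ((s.zip (s.map (fun u => PySem.Str.lower u))).filter (fun p =>
        !((PySem.List.slice (s.map (fun u => PySem.Str.lower u)) none
            (some (PySem.Dict.getD
              ((PySem.List.enumerate (s.map (fun u => PySem.Str.lower u)) 0).foldl pvCutsStep
                PySem.Dict.empty) (PySem.Str.len p.2) 0))).any
            (fun ul => PySem.Str.isIn p.2 ul)))).map (fun p => p.1)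
      = s.filter (fun v => !(s.any (fun u => pvAbs v u))) := by
  rw [zip_map_filter_map s (fun u => PySem.Str.lower u) (fun vl =>
      !((PySem.List.slice (s.map (fun u => PySem.Str.lower u)) none
          (some (PySem.Dict.getD
            ((PySem.List.enumerate (s.map (fun u => PySem.Str.lower u)) 0).foldl pvCutsStep
              PySem.Dict.empty) (PySem.Str.len vl) 0))).any
          (fun ul => PySem.Str.isIn vl ul)))]
  refine List.filter_congr (fun v hv => ?_)
  rw [bigAny_eq s hpw v hv]

-- both programs after the shared step 1, as one statement over the unique list
theorem combined (unique : List String) :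
    (if unique.length ≤ 1 then unique
     else (PySem.List.sorted unique (fun x => PySem.Str.len x) true).foldl
        (fun kept val =>
          if !(kept.any (fun a => pvAbs val a)) then kept ++ [val] else kept) [])
      = (let s := PySem.List.sorted unique (fun x => PySem.Str.len x) true
         ((s.zip (s.map (fun u => PySem.Str.lower u))).filter (fun p =>
            !((PySem.List.slice (s.map (fun u => PySem.Str.lower u)) none
                (some (PySem.Dict.getD
                  ((PySem.List.enumerate (s.map (fun u => PySem.Str.lower u)) 0).foldl pvCutsStep
                    PySem.Dict.empty) (PySem.Str.len p.2) 0))).any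
                (fun ul => PySem.Str.isIn p.2 ul)))).map (fun p => p.1)) := by
  set s := PySem.List.sorted unique (fun x => PySem.Str.len x) true with hs
  have hpw : s.Pairwise (fun a b => b.toList.length ≤ a.toList.length) := by
    have := PySem.List.sorted_pairwise_rev unique (fun x => PySem.Str.len x)
    refine this.imp (fun h => ?_)
    simpa [PySem.Str.len_eq] using h
  show _ = ((s.zip (s.map (fun u => PySem.Str.lower u))).filter _).map _
  rw [alt_step2_eq s hpw]
  by_cases h1 : unique.length ≤ 1
  · rw [if_pos h1]
    rcases hcase : unique with _ | ⟨x, _ | ⟨y, t⟩⟩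
    · subst hcase; rfl
    · subst hcase
      have hsx : s = [x] := hs
      rw [hsx]
      simp [pvAbs]
    · exfalso; rw [hcase] at h1; simp at h1
  · rw [if_neg h1]
    exact foldl_absorb_eq_filter s hpw

-- ===== VERDICT (by name: the statement is the Claim_ definition above) =====
theorem deduplicate_values_spec : Claim_equal_deduplicate_values := by
  intro values _
  show deduplicate_values values = deduplicate_values_alt values
  by_cases hv : values = []
  · subst hv; rfl
  · simp only [deduplicate_values, deduplicate_values_alt, if_neg hv]
    rw [← step1_fun_eq]
    exact combined _
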